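-- pv_equiv track=rewrite | github.com/ksam98/eng-ai-agents | assignments/assignment-2/part_c_semantic_search.py | merge_timestamps_into_intervals
-- ===== SOURCE A (Python) =====
-- def merge_timestamps_into_intervals(timestamps: list[int], max_gap_seconds: int) -> list[tuple[int, int]]:
--     if not timestamps:
--         return []
--
--     intervals: list[tuple[int, int]] = []
--     start = timestamps[0]
--     end = timestamps[0]
--
--     for ts in timestamps[1:]:
--         if ts - end <= max_gap_seconds:
--             end = ts
--         else:
--             intervals.append((start, end))
--             start = ts
--             end = ts
--
--     intervals.append((start, end))
--     return intervals
-- ===== SOURCE B (Python) =====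
-- def merge_timestamps_into_intervals(timestamps: list[int], max_gap_seconds: int) -> list[tuple[int, int]]:
--     n = len(timestamps)
--     if n == 0:
--         return []
--     # Phase 1: indices where a new interval must start (gap to predecessor too large).
--     cuts = [0] + [i for i in range(1, n) if timestamps[i] - timestamps[i - 1] > max_gap_seconds] + [n]
--     # Phase 2: each adjacent cut pair [a, b) is one interval (first, last element).
--     return [(timestamps[a], timestamps[b - 1]) for a, b in zip(cuts, cuts[1:])]
-- ===== Notes on version B (the rewrite author's own statement) =====
-- stated objective: alternative
-- what changed: Replaces A's single running (start,end)-accumulator scan by an index-based two-phase decomposition: first compute the list of cut indices where the gap to the predecessor exceeds max_gap_seconds, then pair adjacent cuts and read each interval's endpoints directly out of the list by index.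
import Mathlib
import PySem

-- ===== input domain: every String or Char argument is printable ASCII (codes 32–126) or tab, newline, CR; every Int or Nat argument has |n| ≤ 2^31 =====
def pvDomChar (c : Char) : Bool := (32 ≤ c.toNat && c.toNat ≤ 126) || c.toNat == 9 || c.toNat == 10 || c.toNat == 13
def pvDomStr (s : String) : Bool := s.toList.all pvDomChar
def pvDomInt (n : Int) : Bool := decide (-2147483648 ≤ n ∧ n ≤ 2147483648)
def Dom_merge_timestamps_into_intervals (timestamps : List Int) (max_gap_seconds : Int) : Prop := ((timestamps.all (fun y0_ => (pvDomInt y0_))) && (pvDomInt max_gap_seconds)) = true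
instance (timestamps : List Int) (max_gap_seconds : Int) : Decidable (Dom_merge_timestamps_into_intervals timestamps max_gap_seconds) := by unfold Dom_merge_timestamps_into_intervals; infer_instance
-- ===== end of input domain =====

-- B replaces A's running (start,end) accumulator by two phases: collect the cut
-- indices where the gap is exceeded, then pair adjacent cuts into intervals.


-- ===== PORT A =====
-- Port of A: fold over timestamps[1:] carrying (intervals, start, end); append (start, end) at the end.
def merge_timestamps_into_intervals (timestamps : List Int) (max_gap_seconds : Int) : List (Int × Int) :=
  match timestamps with
  | [] => []
  | t0 :: rest =>
    let st := rest.foldl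
      (fun (s : List (Int × Int) × Int × Int) ts =>
        if ts - s.2.2 ≤ max_gap_seconds then (s.1, s.2.1, ts)
        else (s.1 ++ [(s.2.1, s.2.2)], ts, ts))
      ([], t0, t0)
    st.1 ++ [(st.2.1, st.2.2)]

-- ===== PORT B =====
-- Port of B: phase 1 filters range(1, n) for the cut indices, phase 2 maps each
-- adjacent cut pair (a, b) to (timestamps[a], timestamps[b-1]).  All indices used
-- are in range by construction, so pyGetD _ _ 0 (= Python's timestamps[i], which
-- raises only out of range) is exact; cuts[1:] is PySem.List.slice cuts 1 none.
def merge_timestamps_into_intervals_alt (timestamps : List Int) (max_gap_seconds : Int) : List (Int × Int) :=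
  let n : Int := timestamps.length
  if timestamps.length = 0 then []
  else
    let cuts : List Int :=
      [0] ++ (PySem.List.pyRange 1 n 1).filter
        (fun i => decide (PySem.List.pyGetD timestamps i 0
                          - PySem.List.pyGetD timestamps (i - 1) 0 > max_gap_seconds)) ++ [n]
    (cuts.zip (PySem.List.slice cuts (some 1) none)).map
      (fun ab => (PySem.List.pyGetD timestamps ab.1 0, PySem.List.pyGetD timestamps (ab.2 - 1) 0))

-- ===== PRECONDITION & SPEC =====
def Spec_merge_timestamps_into_intervals (timestamps : List Int) (max_gap_seconds : Int) (out : List (Int × Int)) : Prop := out = merge_timestamps_into_intervals_alt timestamps max_gap_seconds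
instance (timestamps : List Int) (max_gap_seconds : Int) (out : List (Int × Int)) : Decidable (Spec_merge_timestamps_into_intervals timestamps max_gap_seconds out) := by unfold Spec_merge_timestamps_into_intervals; infer_instance

-- ===== CLAIM (what is proved, stated in full; the proofs are below) =====
def Claim_equal_merge_timestamps_into_intervals : Prop := ∀ (timestamps : List Int) (max_gap_seconds : Int), Dom_merge_timestamps_into_intervals timestamps max_gap_seconds → Spec_merge_timestamps_into_intervals timestamps max_gap_seconds (merge_timestamps_into_intervals timestamps max_gap_seconds)

-- ===== LEMMAS AND PROOFS =====

-- reference recursion: merged intervals starting from (start, end_) with gap bound g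
def mergeGo (g : Int) (start end_ : Int) : List Int → List (Int × Int)
  | [] => [(start, end_)]
  | t :: ts => if t - end_ ≤ g then mergeGo g start t ts
               else (start, end_) :: mergeGo g t t ts

-- the end of the first merged interval / the remaining intervals (independent of start)
def fEnd (g e : Int) : List Int → Int
  | [] => e
  | t :: ts => if t - e ≤ g then fEnd g t ts else e

def fRest (g e : Int) : List Int → List (Int × Int)
  | [] => []
  | t :: ts => if t - e ≤ g then fRest g t ts else mergeGo g t t ts

lemma mergeGo_decomp (g : Int) : ∀ (l : List Int) (s e : Int),
    mergeGo g s e l = (s, fEnd g e l) :: fRest g e l := by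
  intro l
  induction l with
  | nil => intro s e; simp [mergeGo, fEnd, fRest]
  | cons t ts ih =>
    intro s e
    by_cases h : t - e ≤ g <;> simp [mergeGo, fEnd, fRest, h, ih]

-- A's fold produces mergeGo
lemma a_fold_eq (g : Int) :
    ∀ (rest : List Int) (acc : List (Int × Int)) (s e : Int),
      (let st := rest.foldl
        (fun (st : List (Int × Int) × Int × Int) ts =>
          if ts - st.2.2 ≤ g then (st.1, st.2.1, ts)
          else (st.1 ++ [(st.2.1, st.2.2)], ts, ts)) (acc, s, e)
       st.1 ++ [(st.2.1, st.2.2)]) = acc ++ mergeGo g s e rest := by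
  intro rest
  induction rest with
  | nil => intro acc s e; simp [mergeGo]
  | cons t ts ih =>
    intro acc s e
    by_cases h : t - e ≤ g
    · simp only [List.foldl_cons, if_pos h, mergeGo, ih]
    · simp only [List.foldl_cons, if_neg h, mergeGo, ih, List.append_assoc,
        List.singleton_append]

-- B abstractions
def pf (ts : List Int) (ab : Int × Int) : Int × Int :=
  (PySem.List.pyGetD ts ab.1 0, PySem.List.pyGetD ts (ab.2 - 1) 0)

def bnds (ts : List Int) (g : Int) : List Int :=
  (PySem.List.pyRange 1 (ts.length : Int) 1).filter
    (fun i => decide (PySem.List.pyGetD ts i 0 - PySem.List.pyGetD ts (i - 1) 0 > g))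

def pairsOf (ts : List Int) (cuts : List Int) : List (Int × Int) :=
  (cuts.zip cuts.tail).map (pf ts)

lemma pyGetD_cons_add_one (x : Int) (xs : List Int) (i : Int) (h : 0 ≤ i) :
    PySem.List.pyGetD (x :: xs) (i + 1) 0 = PySem.List.pyGetD xs i 0 := by
  obtain ⟨k, rfl⟩ := Int.eq_ofNat_of_zero_le h
  rw [show ((k : Int) + 1) = ((k + 1 : Nat) : Int) by push_cast; ring,
      PySem.List.pyGetD_natCast, PySem.List.pyGetD_natCast]
  simp [List.getD]

lemma pyGetD_zero_cons (x : Int) (xs : List Int) :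
    PySem.List.pyGetD (x :: xs) 0 0 = x := by
  rw [show (0 : Int) = ((0 : Nat) : Int) by norm_num, PySem.List.pyGetD_natCast]
  rfl

lemma pyGetD_one_cons (x y : Int) (xs : List Int) :
    PySem.List.pyGetD (x :: y :: xs) 1 0 = y := by
  rw [show (1 : Int) = ((1 : Nat) : Int) by norm_num, PySem.List.pyGetD_natCast]
  rfl

lemma mem_bnds_ge_one (ts : List Int) (g : Int) : ∀ i ∈ bnds ts g, 1 ≤ i := by
  intro i hi
  have := List.mem_filter.mp hi |>.1
  exact (PySem.List.mem_pyRange_one.mp this).1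

-- boundary-index shift: the cut indices of t0 :: tail are the (possible) cut at 1
-- followed by the cut indices of tail shifted by one
lemma bnds_shift (t0 t1 : Int) (rest : List Int) (g : Int) :
    bnds (t0 :: t1 :: rest) g
      = (if t1 - t0 > g then [1] else []) ++ (bnds (t1 :: rest) g).map (· + 1) := by
  unfold bnds
  have hn : (((t0 :: t1 :: rest).length : Int)) = ((t1 :: rest).length : Int) + 1 := by
    simp
  rw [hn]
  set m : Int := ((t1 :: rest).length : Int) with hm
  have hm1 : (1 : Int) ≤ m := by simp [hm]
  rw [PySem.List.pyRange_one_cons (by omega : (1:Int) < m + 1)]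
  have hshift : PySem.List.pyRange (1 + 1) (m + 1) 1 = (PySem.List.pyRange 1 m 1).map (· + 1) := by
    rw [PySem.List.pyRange_one, PySem.List.pyRange_one, List.map_map]
    have : (m + 1 - (1 + 1)).toNat = (m - 1).toNat := by omega
    rw [this]
    apply List.map_congr_left
    intro k _
    simp; ring
  rw [hshift, List.filter_cons, List.filter_map]
  have hp1 : (decide (PySem.List.pyGetD (t0 :: t1 :: rest) 1 0
      - PySem.List.pyGetD (t0 :: t1 :: rest) (1 - 1) 0 > g)) = decide (t1 - t0 > g) := by
    norm_num [pyGetD_one_cons, pyGetD_zero_cons]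
  have hpred : ∀ i ∈ PySem.List.pyRange 1 m 1,
      (decide (PySem.List.pyGetD (t0 :: t1 :: rest) (i + 1) 0
        - PySem.List.pyGetD (t0 :: t1 :: rest) (i + 1 - 1) 0 > g))
      = (decide (PySem.List.pyGetD (t1 :: rest) i 0
        - PySem.List.pyGetD (t1 :: rest) (i - 1) 0 > g)) := by
    intro i hi
    have h1 : (1 : Int) ≤ i := (PySem.List.mem_pyRange_one.mp hi).1
    have e1 : PySem.List.pyGetD (t0 :: t1 :: rest) (i + 1) 0
        = PySem.List.pyGetD (t1 :: rest) i 0 := pyGetD_cons_add_one _ _ i (by omega)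
    have e2 : PySem.List.pyGetD (t0 :: t1 :: rest) (i + 1 - 1) 0
        = PySem.List.pyGetD (t1 :: rest) (i - 1) 0 := by
      rw [show i + 1 - 1 = (i - 1) + 1 by ring]
      exact pyGetD_cons_add_one _ _ (i - 1) (by omega)
    rw [e1, e2]
  rw [List.filter_congr (by intro i hi; exact hpred i hi)]
  by_cases hgap : t1 - t0 > g
  · simp only [hp1, hgap, decide_true, if_pos]
    simp
  · simp only [hp1, hgap, decide_false, if_false]
    simp

lemma pf_shift (t0 : Int) (tail : List Int) (a b : Int) (ha : 0 ≤ a) (hb : 1 ≤ b) :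
    pf (t0 :: tail) (a + 1, b + 1) = pf tail (a, b) := by
  unfold pf
  have e1 := pyGetD_cons_add_one t0 tail a ha
  have e2 : PySem.List.pyGetD (t0 :: tail) b 0
      = PySem.List.pyGetD tail (b - 1) 0 := by
    conv_lhs => rw [show b = (b - 1) + 1 by ring]
    exact pyGetD_cons_add_one t0 tail (b - 1) (by omega)
  rw [show b + 1 - 1 = b by ring, e1, e2]

lemma pairs_shift (t0 : Int) (tail : List Int) :
    ∀ cuts : List Int, (∀ c ∈ cuts, 0 ≤ c) → (∀ c ∈ cuts.tail, 1 ≤ c) →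
      ((cuts.map (· + 1)).zip (cuts.map (· + 1)).tail).map (pf (t0 :: tail))
        = (cuts.zip cuts.tail).map (pf tail) := by
  intro cuts
  induction cuts with
  | nil => intro _ _; simp
  | cons a r ih =>
    intro h0 h1
    cases r with
    | nil => simp
    | cons b r' =>
      have h := ih (fun c hc => h0 c (List.mem_cons_of_mem a hc))
        (fun c hc => h1 c (by simp at hc ⊢; tauto))
      simp only [List.map_cons, List.tail_cons] at h
      simp only [List.map_cons, List.tail_cons, List.zip_cons_cons, List.map_cons]
      rw [pf_shift t0 tail a b (h0 a (by simp)) (h1 b (by simp))]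
      exact congrArg (List.cons (pf tail (a, b))) h

-- main bridge: the cut-pair construction equals mergeGo
lemma b_pairs_eq (g : Int) : ∀ (rest : List Int) (t0 : Int),
    pairsOf (t0 :: rest) (0 :: (bnds (t0 :: rest) g ++ [((t0 :: rest).length : Int)]))
      = mergeGo g t0 t0 rest := by
  intro rest
  induction rest with
  | nil =>
    intro t0
    have hb : bnds [t0] g = [] := by
      unfold bnds
      simp [PySem.List.pyRange_one_eq_nil]
    simp [hb, pairsOf, pf, mergeGo]
  | cons t1 rs ih =>
    intro t0
    have hC1 : ∀ c ∈ bnds (t1 :: rs) g ++ [((t1 :: rs).length : Int)], 1 ≤ c := by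
      intro c hc
      rcases List.mem_append.mp hc with h | h
      · exact mem_bnds_ge_one _ _ c h
      · simp at h; subst h; simp
    have hC0 : ∀ c ∈ (0 : Int) :: (bnds (t1 :: rs) g ++ [((t1 :: rs).length : Int)]), 0 ≤ c := by
      intro c hc
      rcases List.mem_cons.mp hc with h | h
      · omega
      · have := hC1 c h; omega
    have hlen : (((t0 :: t1 :: rs).length : Int)) = ((t1 :: rs).length : Int) + 1 := by
      simp
    rw [bnds_shift t0 t1 rs g]
    by_cases hgap : t1 - t0 > g
    · -- a large gap at index 1: cuts(ts) = 0 :: map (+1) (0 :: C)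
      have hcuts : (0 : Int) :: ((if t1 - t0 > g then [1] else [])
            ++ (bnds (t1 :: rs) g).map (· + 1) ++ [((t0 :: t1 :: rs).length : Int)])
          = 0 :: (((0 : Int) :: (bnds (t1 :: rs) g ++ [((t1 :: rs).length : Int)])).map (· + 1)) := by
        simp [hgap]
      rw [hcuts]
      unfold pairsOf
      rw [show mergeGo g t0 t0 (t1 :: rs) = (t0, t0) :: mergeGo g t1 t1 rs from by
        simp [mergeGo, show ¬ (t1 - t0 ≤ g) by omega]]
      rw [← ih t1]
      unfold pairsOf
      simp only [List.map_cons, List.tail_cons, List.zip_cons_cons, List.map_cons]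
      congr 1
      · -- pf ts (0, 0 + 1) = (t0, t0)
        unfold pf
        rw [show (0 : Int) + 1 - 1 = 0 by ring, pyGetD_zero_cons]
      · have h := pairs_shift t0 (t1 :: rs)
          ((0 : Int) :: (bnds (t1 :: rs) g ++ [((t1 :: rs).length : Int)])) hC0 (by simpa using hC1)
        simp only [List.map_cons, List.tail_cons] at h
        exact h
    · -- no gap at index 1: cuts(ts) = 0 :: map (+1) C
      set C : List Int := bnds (t1 :: rs) g ++ [((t1 :: rs).length : Int)] with hCdef
      have hcuts : (0 : Int) :: ((if t1 - t0 > g then [1] else [])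
            ++ (bnds (t1 :: rs) g).map (· + 1) ++ [((t0 :: t1 :: rs).length : Int)])
          = 0 :: (C.map (· + 1)) := by
        simp [hgap, hCdef]
      rw [hcuts]
      obtain ⟨c0, C', hC⟩ : ∃ c0 C', C = c0 :: C' := by
        rw [hCdef]
        cases bnds (t1 :: rs) g with
        | nil => exact ⟨_, _, rfl⟩
        | cons x xs => exact ⟨_, _, rfl⟩
      have hc01 : 1 ≤ c0 := hC1 c0 (by rw [hC]; simp)
      have hIH := ih t1
      unfold pairsOf at hIH
      rw [← hCdef, hC] at hIH
      simp only [List.tail_cons, List.zip_cons_cons, List.map_cons] at hIH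
      rw [mergeGo_decomp g rs t1 t1] at hIH
      have hfst : pf (t1 :: rs) (0, c0) = (t1, fEnd g t1 rs) := (List.cons.inj hIH).1
      have hrest : ((c0 :: C').zip C').map (pf (t1 :: rs)) = fRest g t1 rs := (List.cons.inj hIH).2
      unfold pairsOf
      rw [hC]
      simp only [List.map_cons, List.tail_cons, List.zip_cons_cons, List.map_cons]
      rw [show mergeGo g t0 t0 (t1 :: rs) = mergeGo g t0 t1 rs from by
        simp [mergeGo, show t1 - t0 ≤ g by omega]]
      rw [mergeGo_decomp g rs t0 t1]
      congr 1
      · -- pf ts (0, c0 + 1) = (t0, fEnd g t1 rs)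
        have hsnd : PySem.List.pyGetD (t1 :: rs) (c0 - 1) 0 = fEnd g t1 rs := by
          have := congrArg Prod.snd hfst
          simpa [pf] using this
        unfold pf
        rw [show c0 + 1 - 1 = (c0 - 1) + 1 by ring,
          pyGetD_cons_add_one t0 (t1 :: rs) (c0 - 1) (by omega), hsnd, pyGetD_zero_cons]
      · have h := pairs_shift t0 (t1 :: rs) (c0 :: C')
          (fun c hc => hC0 c (List.mem_cons_of_mem 0 (hC.symm ▸ hc)))
          (fun c hc => hC1 c (hC.symm ▸ List.mem_cons_of_mem c0 hc))
        simp only [List.map_cons, List.tail_cons] at h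
        rw [h, hrest]

-- ===== VERDICT (by name: the statement is the Claim_ definition above) =====
theorem merge_timestamps_into_intervals_spec : Claim_equal_merge_timestamps_into_intervals := by
  intro timestamps g _
  unfold Spec_merge_timestamps_into_intervals
  cases timestamps with
  | nil => rfl
  | cons t0 rest =>
    have hb := b_pairs_eq g rest t0
    have ha := a_fold_eq g rest [] t0 t0
    simp only [List.nil_append] at ha
    simp only [merge_timestamps_into_intervals]
    rw [ha]
    simp only [merge_timestamps_into_intervals_alt]
    rw [if_neg (by simp)]
    rw [PySem.List.slice_from_one]
    unfold pairsOf pf at hb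
    rw [← hb]
    simp [bnds]
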